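-- pv_equiv track=rewrite | github.com/landjbs/MarkovTree-TextGenerator | helpers.py | str_check
-- ===== SOURCE A (Python) =====
-- def str_check(a,b):
--     '''
--     purpose: determine which of two strings comes first alphabetically
--     args: a - subject string
--           b - string to be checked against
--     returns: 0 if words are the same
--              1 if subject string is alphabetically first
--              -1 if check string is alphabetically first
--              str_check("fo", "foo") returns 1
--     '''
--     #take strings to uppercase
--     subject = a.lower()
--     check = b.lower()
--     #determine if strings are the same
--     if subject == check:
--         return 0
--     #take length of shortest string
--     length = min([len(subject),len(check)])
--     #iterate through letters to determine first string
--     for i in range(length):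
--         if ord(subject[i]) > ord(check[i]):
--             return -1
--         elif ord(subject[i]) < ord(check[i]):
--             return 1
--     #if the letters are the same, shortest string is first alphabetically
--     if len(subject) > length:
--         return -1
--     else:
--         return 1
-- ===== SOURCE B (Python) =====
-- def str_check(a, b):
--     s = a.lower()
--     c = b.lower()
--     return 0 if s == c else (1 if s < c else -1)
-- ===== Notes on version B (the rewrite author's own statement) =====
-- stated objective: simpler
-- what changed: Replaces the manual per-character ord loop and prefix tie-break with Python's built-in three-way lexicographic string comparison on the lowercased inputs.
import Mathlib
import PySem

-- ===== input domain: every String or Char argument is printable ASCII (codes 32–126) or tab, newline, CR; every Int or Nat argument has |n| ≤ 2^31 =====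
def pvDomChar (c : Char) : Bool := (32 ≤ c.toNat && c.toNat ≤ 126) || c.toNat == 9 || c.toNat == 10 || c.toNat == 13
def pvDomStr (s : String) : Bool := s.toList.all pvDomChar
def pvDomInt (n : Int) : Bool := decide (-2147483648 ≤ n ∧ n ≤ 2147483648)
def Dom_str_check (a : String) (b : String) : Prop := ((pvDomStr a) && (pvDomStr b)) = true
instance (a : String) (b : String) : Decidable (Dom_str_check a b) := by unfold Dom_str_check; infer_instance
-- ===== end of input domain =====

-- B replaces A's per-character ord loop with the built-in lexicographic string comparison (simpler; return value only, no side effects).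
-- ===== PORT A =====
-- the for-loop over i in range(min(len s, len c)), comparing s[i] and c[i]; falling out of
-- the loop (one list exhausted) reaches A's final 'len(subject) > length' prefix tie-break
def strCheckLoop : List Char → List Char → Int
  | x :: xs, y :: ys =>
      if x.toNat > y.toNat then -1
      else if x.toNat < y.toNat then 1
      else strCheckLoop xs ys
  | _ :: _, [] => -1      -- len(subject) > length
  | [], _ => 1            -- else branch

def str_check (a : String) (b : String) : Int :=
  let subject := PySem.Chars.lower a.toList
  let check := PySem.Chars.lower b.toList
  if subject = check then 0 else strCheckLoop subject check

-- ===== PORT B =====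
def str_check_alt (a : String) (b : String) : Int :=
  let s := PySem.Chars.lower a.toList
  let c := PySem.Chars.lower b.toList
  if s = c then 0 else if s < c then 1 else -1

-- ===== PRECONDITION & SPEC =====
def Spec_str_check (a : String) (b : String) (out : Int) : Prop := out = str_check_alt a b
instance (a : String) (b : String) (out : Int) : Decidable (Spec_str_check a b out) := by unfold Spec_str_check; infer_instance

-- ===== CLAIM (what is proved, stated in full; the proofs are below) =====
def Claim_equal_str_check : Prop := ∀ (a : String) (b : String), Dom_str_check a b → Spec_str_check a b (str_check a b)

-- ===== LEMMAS AND PROOFS =====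
theorem strCheckLoop_eq (s c : List Char) (h : s ≠ c) :
    strCheckLoop s c = if s < c then 1 else -1 := by
  induction s generalizing c with
  | nil =>
    cases c with
    | nil => exact absurd rfl h
    | cons y ys => simp [strCheckLoop, List.nil_lt_cons]
  | cons x xs ih =>
    cases c with
    | nil => simp [strCheckLoop, List.not_lt_nil]
    | cons y ys =>
      simp only [strCheckLoop, List.cons_lt_cons_iff]
      rcases Nat.lt_trichotomy x.toNat y.toNat with hlt | heq | hgt
      · have hxy : x < y := Char.lt_def.mpr hlt
        simp [hlt, Nat.not_lt.mpr (Nat.le_of_lt hlt), hxy]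
      · have hxy : x = y := by apply Char.ext; exact UInt32.toNat_inj.mp heq
        subst hxy
        have hne : xs ≠ ys := by intro he; exact h (by rw [he])
        simp [lt_irrefl, ih ys hne]
      · have h1 : ¬ x < y := by
          intro hxy; exact absurd (Char.lt_def.mp hxy) (Nat.not_lt.mpr (Nat.le_of_lt hgt))
        have h2 : x ≠ y := by
          intro he; subst he; exact Nat.lt_irrefl _ hgt
        simp [hgt, h1, h2]

-- ===== VERDICT (by name: the statement is the Claim_ definition above) =====
theorem str_check_spec : Claim_equal_str_check := by
  intro a b _
  unfold Spec_str_check str_check str_check_alt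
  by_cases h : PySem.Chars.lower a.toList = PySem.Chars.lower b.toList
  · simp [h]
  · simp only [h, if_neg h, strCheckLoop_eq _ _ h]
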